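-- pv_equiv track=rewrite | github.com/epapoutsellis/StochasticCIL | Wrappers/Python/cil/optimisation/utilities/HermanMeyerSampling.py | herman_meyer_order
-- ===== SOURCE A (Python) =====
-- import math
--
-- def prime_decomposition(n):
--
--     """
--     Perform prime decomposition of a given number.
--
--     Parameters
--     ----------
--     n : int
--         Number to decompose into prime factors.
--
--     Returns
--     -------
--     list
--         List of prime factors of the input number.
--
--     Examples
--     --------
--     >>> prime_decomposition(12)
--     [2, 2, 3]
--
--     >>> prime_decomposition(29)
--     [29]
--     """
--
--     factors = []
--     i = 2
--
--     while i * i <= n: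
--         if n % i:
--             i += 1
--         else:
--             n //= i
--             factors.append(i)
--
--     if n > 1:
--         factors.append(n)
--
--     return factors
--
-- def herman_meyer_order(n):
--
--     """
--     Generate the Herman-Meyer order for a given number.
--
--     Parameters
--     ----------
--     n : int
--         Number for which to generate the Herman-Meyer order.
--
--     Returns
--     -------
--     list
--         Herman-Meyer order for the given number.
--
--     Examples
--     --------
--     >>> herman_meyer_order(15)
--     [0, 5, 10, 1, 6, 11, 2, 7, 12, 3, 8, 13, 4, 9, 14]
--
--     >>> herman_meyer_order(30)
--     [0, 15, 5, 20, 10, 25, 1, 16, 6, 21, 11, 26, 2, 17, 7, 22, 12, 27, 3, 18, 8, 23, 13, 28, 4, 19, 9, 24, 14, 29]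
--
--     >>> herman_meyer_order(7)
--     [0, 1, 2, 3, 4, 5, 6]
--     """
--
--     # prime decomposition
--     factors = prime_decomposition(n)
--
--     # len of prime factors
--     n_factors = len(factors)
--
--     # initialize
--     order =  [0]*n
--
--     value = 0
--
--     for factor_n in range(n_factors):
--
--         n_rep_value = 0
--
--         if factor_n == 0:
--             n_change_value = 1
--         else:
--             n_change_value = math.prod(factors[:factor_n])
--
--         for element in range(n):
--
--             mapping = value
--             n_rep_value += 1
--             if n_rep_value >= n_change_value:
--                 value = value + 1
--                 n_rep_value = 0
--             if value == factors[factor_n]: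
--                 value = 0
--             order[element] = order[element] + math.prod(factors[factor_n+1:]) * mapping
--
--     return order
-- ===== SOURCE B (Python) =====
-- import math
--
-- def prime_decomposition(n):
--     factors = []
--     i = 2
--     while i * i <= n:
--         if n % i:
--             i += 1
--         else:
--             n //= i
--             factors.append(i)
--     if n > 1:
--         factors.append(n)
--     return factors
--
-- def herman_meyer_order(n):
--     # Compute each position directly: the value at index e is e's mixed-radix
--     # digits (least-significant factor first) re-weighted by suffix products.
--     factors = prime_decomposition(n)
--     k = len(factors)
--     # suffix weights: weights[j] = product of factors[j+1:]
--     weights = [1] * k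
--     acc = 1
--     for j in range(k - 1, -1, -1):
--         weights[j] = acc
--         acc *= factors[j]
--     order = []
--     for e in range(n):
--         x = e
--         val = 0
--         for j in range(k):
--             val += (x % factors[j]) * weights[j]
--             x //= factors[j]
--         order.append(val)
--     return order
-- ===== Notes on version B (the rewrite author's own statement) =====
-- stated objective: alternative
-- what changed: Instead of A's outer loop over prime factors maintaining incremental modular counters (value/n_rep_value) and repeatedly updating every slot of the output array, B loops over each element once and extracts its mixed-radix digits directly by repeated division/modulo, combining them with precomputed suffix weights; the suffix weights are built in one reverse pass instead of a math.prod over a slice per factor.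
import Mathlib
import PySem

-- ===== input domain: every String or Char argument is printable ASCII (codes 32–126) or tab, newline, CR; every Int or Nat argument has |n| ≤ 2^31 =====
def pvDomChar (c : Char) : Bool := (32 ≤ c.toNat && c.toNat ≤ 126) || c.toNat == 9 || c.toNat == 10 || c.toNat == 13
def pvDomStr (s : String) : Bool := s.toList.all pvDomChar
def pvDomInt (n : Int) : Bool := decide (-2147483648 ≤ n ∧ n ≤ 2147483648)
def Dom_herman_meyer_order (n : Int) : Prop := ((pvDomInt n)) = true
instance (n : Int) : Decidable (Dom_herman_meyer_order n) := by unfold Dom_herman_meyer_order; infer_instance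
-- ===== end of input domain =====

-- B replaces A's per-factor sweep with incremental modular counters by a per-element
-- mixed-radix digit extraction (repeated division) against precomputed suffix weights;
-- same O(n·k) cost, different decomposition.

-- ===== PORT A =====
-- math.prod
def pvProd (xs : List Int) : Int := xs.foldl (· * ·) 1

-- the while-loop of prime_decomposition (it mutates n, i, factors); the hypothesis
-- 2 ≤ i records the caller's start value i = 2 and is used only for termination
def pvPrimeLoop (n i : Int) (hi : 2 ≤ i) (factors : List Int) : List Int :=
  if _h : i * i ≤ n then
    if PySem.Int.mod n i ≠ 0 then
      pvPrimeLoop n (i + 1) (by omega) factors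
    else
      pvPrimeLoop (PySem.Int.floordiv n i) i hi (factors ++ [i])
  else if 1 < n then factors ++ [n] else factors
termination_by (n.toNat, (n + 1 - i).toNat)
decreasing_by
  · apply Prod.Lex.right
    have : i ≤ i * i := le_mul_of_one_le_left (by omega) (by omega)
    omega
  · apply Prod.Lex.left
    have hpos : (0:Int) < n := by nlinarith
    have h1 : n / i < n := by
      have := Int.ediv_lt_iff_lt_mul (a := n) (b := n) (c := i) (by omega)
      apply this.mpr; nlinarith
    have _h2 : 0 ≤ n / i := Int.ediv_nonneg (by omega) (by omega)
    rw [PySem.Int.floordiv_eq_ediv_of_pos (by omega)]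
    omega

def prime_decomposition (n : Int) : List Int := pvPrimeLoop n 2 (by omega) []

-- body of A's inner 'for element in range(n)' loop; state = (order, value, n_rep_value)
def pvInnerStep (factors : List Int) (factor_n n_change : Int)
    (st : List Int × Int × Int) (element : Int) : List Int × Int × Int :=
  let order := st.1
  let value := st.2.1
  let n_rep_value := st.2.2
  let mapping := value
  let n_rep_value := n_rep_value + 1
  let value := if n_rep_value ≥ n_change then value + 1 else value
  let n_rep_value := if st.2.2 + 1 ≥ n_change then 0 else n_rep_value
  let value := if value = PySem.List.pyGetD factors factor_n 0 then 0 else value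
  let order := order.set element.toNat
      (PySem.List.pyGetD order element 0
        + pvProd (PySem.List.slice factors (some (factor_n + 1)) none) * mapping)
  (order, value, n_rep_value)

-- body of A's outer 'for factor_n in range(n_factors)' loop; state = (order, value)
def pvOuterStep (factors : List Int) (n : Int) (st : List Int × Int) (factor_n : Int) :
    List Int × Int :=
  let n_change := if factor_n = 0 then (1:Int)
                  else pvProd (PySem.List.slice factors none (some factor_n))
  let r := (PySem.List.pyRange 0 n 1).foldl (pvInnerStep factors factor_n n_change)
             (st.1, st.2, 0)
  (r.1, r.2.1)

def herman_meyer_order (n : Int) : List Int :=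
  let factors := prime_decomposition n
  let n_factors : Int := (factors.length : Int)
  let order : List Int := List.replicate n.toNat 0   -- [0]*n
  let res := (PySem.List.pyRange 0 n_factors 1).foldl (pvOuterStep factors n) (order, 0)
  res.1

-- ===== PORT B =====
-- B's reverse pass 'for j in range(k-1, -1, -1): weights[j] = acc; acc *= factors[j]':
-- returns (weights, final acc)
def pvSuffixWeights : List Int → List Int × Int
  | [] => ([], 1)
  | f :: rest =>
    let (ws, acc) := pvSuffixWeights rest
    (acc :: ws, f * acc)

-- B's inner 'for j in range(k)' loop: digit extraction by repeated division
def pvDigitsLoop : List Int → List Int → Int → Int → Int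
  | f :: fs, w :: ws, x, val =>
      pvDigitsLoop fs ws (PySem.Int.floordiv x f) (val + PySem.Int.mod x f * w)
  | _, _, _, val => val

def herman_meyer_order_alt (n : Int) : List Int :=
  let factors := prime_decomposition n
  let weights := (pvSuffixWeights factors).1
  (PySem.List.pyRange 0 n 1).foldl
    (fun order e => order ++ [pvDigitsLoop factors weights e 0]) []

-- ===== PRECONDITION & SPEC =====
def Spec_herman_meyer_order (n : Int) (out : List Int) : Prop := out = herman_meyer_order_alt n
instance (n : Int) (out : List Int) : Decidable (Spec_herman_meyer_order n out) := by unfold Spec_herman_meyer_order; infer_instance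

-- ===== CLAIM (what is proved, stated in full; the proofs are below) =====
def Claim_equal_herman_meyer_order : Prop := ∀ (n : Int), Dom_herman_meyer_order n → Spec_herman_meyer_order n (herman_meyer_order n)

-- ===== LEMMAS AND PROOFS =====

lemma pvProd_eq (xs : List Int) : pvProd xs = xs.prod := List.prod_eq_foldl.symm

lemma primeLoop_mem (n i : Int) (hi : 2 ≤ i) (acc : List Int) :
    ∀ x ∈ pvPrimeLoop n i hi acc, x ∈ acc ∨ 2 ≤ x := by
  induction n, i, hi, acc using pvPrimeLoop.induct with
  | case1 n i hi acc h hne ih =>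
    rw [pvPrimeLoop]; simp only [dif_pos h, if_pos hne]
    exact ih
  | case2 n i hi acc h hne ih =>
    rw [pvPrimeLoop]; simp only [dif_pos h, if_neg hne]
    intro x hx
    rcases ih x hx with hx' | hx'
    · rcases List.mem_append.mp hx' with h' | h'
      · exact Or.inl h'
      · right; simp at h'; omega
    · exact Or.inr hx'
  | case3 n i hi acc h h2 =>
    rw [pvPrimeLoop]; simp only [dif_neg h, if_pos h2]
    intro x hx
    rcases List.mem_append.mp hx with h' | h'
    · exact Or.inl h'
    · right; simp at h'; omega
  | case4 n i hi acc h h2 =>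
    rw [pvPrimeLoop]; simp only [dif_neg h, if_neg h2]
    exact fun x hx => Or.inl hx

lemma primeLoop_prod (n i : Int) (hi : 2 ≤ i) (acc : List Int) :
    1 ≤ n → (pvPrimeLoop n i hi acc).prod = acc.prod * n := by
  induction n, i, hi, acc using pvPrimeLoop.induct with
  | case1 n i hi acc h hne ih =>
    intro hn
    rw [pvPrimeLoop]; simp only [dif_pos h, if_pos hne]
    exact ih hn
  | case2 n i hi acc h hne ih =>
    intro hn
    rw [pvPrimeLoop]; simp only [dif_pos h, if_neg hne]
    simp only [ne_eq, not_not] at hne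
    have hdvd : i ∣ n := (PySem.Int.mod_eq_zero_iff_dvd n i).mp hne
    have hipos : (0:Int) < i := by omega
    have hfd : PySem.Int.floordiv n i = n / i := PySem.Int.floordiv_eq_ediv_of_pos hipos
    obtain ⟨k, hk⟩ := hdvd
    have hkval : n / i = k := by rw [hk, Int.mul_ediv_cancel_left k (by omega)]
    have hk1 : 1 ≤ k := by nlinarith
    rw [hfd, hkval] at ih ⊢
    rw [ih hk1]
    simp [hk]; ring
  | case3 n i hi acc h h2 =>
    intro hn
    rw [pvPrimeLoop]; simp only [dif_neg h, if_pos h2]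
    simp
  | case4 n i hi acc h h2 =>
    intro hn
    rw [pvPrimeLoop]; simp only [dif_neg h, if_neg h2]
    have : n = 1 := by omega
    simp [this]

-- the value A's order[e] converges to: the mixed-radix digits of e (prefix product p
-- consumed so far) weighted by suffix products — exactly what B computes per element
def hmSum : List Int → Int → Int → Int
  | [], _, _ => 0
  | f :: rest, p, e => rest.prod * ((e / p) % f) + hmSum rest (p * f) e

lemma map_getD_self (order : List Int) (n : Nat) (h : order.length = n) :
    (List.range n).map (fun e => order.getD e 0) = order := by
  apply List.ext_getElem (by simp [h])
  intro i h1 h2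
  simp [List.getElem?_eq_getElem h2]

lemma counter_step (c f t : Int) (hc : 1 ≤ c) (hf : 2 ≤ f) :
    (if (if t % c + 1 ≥ c then (t / c) % f + 1 else (t / c) % f) = f then 0
     else (if t % c + 1 ≥ c then (t / c) % f + 1 else (t / c) % f)) = ((t + 1) / c) % f
    ∧ (if t % c + 1 ≥ c then 0 else t % c + 1) = (t + 1) % c := by
  have hd : c * (t / c) + t % c = t := Int.mul_ediv_add_emod t c
  have hr0 : 0 ≤ t % c := Int.emod_nonneg t (by omega)
  have hr1 : t % c < c := Int.emod_lt_of_pos t (by omega)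
  set q := t / c with hq
  set r := t % c with hr
  have hv0 : 0 ≤ q % f := Int.emod_nonneg q (by omega)
  have hv1 : q % f < f := Int.emod_lt_of_pos q (by omega)
  have hd2 : f * (q / f) + q % f = q := Int.mul_ediv_add_emod q f
  set q2 := q / f with hq2
  set v := q % f with hv
  by_cases hcr : r + 1 ≥ c
  · have hmul : c * (q + 1) = c * q + c := by ring
    have huniq := (Int.ediv_emod_unique (a := t + 1) (b := c) (q := q + 1) (r := 0)
      (by omega)).mpr ⟨by omega, by omega, by omega⟩
    rw [if_pos hcr, if_pos hcr, huniq.1, huniq.2]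
    refine ⟨?_, rfl⟩
    by_cases hvf : v + 1 = f
    · have hmul2 : f * (q2 + 1) = f * q2 + f := by ring
      have hu2 := (Int.ediv_emod_unique (a := q + 1) (b := f) (q := q2 + 1) (r := 0)
        (by omega)).mpr ⟨by omega, by omega, by omega⟩
      rw [if_pos hvf, hu2.2]
    · have hu2 := (Int.ediv_emod_unique (a := q + 1) (b := f) (q := q2) (r := v + 1)
        (by omega)).mpr ⟨by omega, by omega, by omega⟩
      rw [if_neg hvf, hu2.2]
  · have huniq := (Int.ediv_emod_unique (a := t + 1) (b := c) (q := q) (r := r + 1)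
      (by omega)).mpr ⟨by omega, by omega, by omega⟩
    rw [if_neg hcr, if_neg hcr, huniq.1, huniq.2]
    exact ⟨by rw [if_neg (by omega)], rfl⟩

lemma inner_loop (factors : List Int) (factor_n c f w : Int)
    (hfv : PySem.List.pyGetD factors factor_n 0 = f)
    (hwv : pvProd (PySem.List.slice factors (some (factor_n + 1)) none) = w)
    (hc : 1 ≤ c) (hf : 2 ≤ f) :
    ∀ (m : Nat) (t n : Int) (order : List Int), t + m = n → 0 ≤ t →
      order.length = n.toNat →
    (PySem.List.pyRange t n 1).foldl (pvInnerStep factors factor_n c)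
        (order, (t / c) % f, t % c)
      = ((List.range n.toNat).map
           (fun e => order.getD e 0 + if t ≤ (e : Int) then w * (((e : Int) / c) % f) else 0),
         (n / c) % f, n % c) := by
  intro m
  induction m with
  | zero =>
    intro t n order hm ht hlen
    have htn : t = n := by omega
    subst htn
    rw [PySem.List.pyRange_one_eq_nil (by omega), List.foldl_nil]
    have hmap : (List.range t.toNat).map
        (fun e => order.getD e 0 + if t ≤ (e : Int) then w * (((e : Int) / c) % f) else 0)
        = (List.range t.toNat).map (fun e => order.getD e 0) := by
      apply List.map_congr_left
      intro e he
      simp only [List.mem_range] at he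
      rw [if_neg (by omega), add_zero]
    rw [hmap, map_getD_self order _ hlen]
  | succ m ih =>
    intro t n order hm ht hlen
    have htn : t < n := by omega
    rw [PySem.List.pyRange_one_cons (by omega), List.foldl_cons]
    have htlt : t.toNat < order.length := by omega
    have hget : PySem.List.pyGetD order t 0 = order.getD t.toNat 0 := by
      rw [PySem.List.pyGetD_eq_getElem order 0 ht (by omega), List.getD_eq_getElem _ _ htlt]
    have hstep : pvInnerStep factors factor_n c (order, (t / c) % f, t % c) t
        = (order.set t.toNat (order.getD t.toNat 0 + w * ((t / c) % f)),
           ((t + 1) / c) % f, (t + 1) % c) := by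
      have hcs := counter_step c f t hc hf
      simp only [pvInnerStep, hget, hwv, hfv]
      exact Prod.ext rfl (Prod.ext hcs.1 hcs.2)
    rw [hstep]
    rw [ih (t + 1) n (order.set t.toNat (order.getD t.toNat 0 + w * ((t / c) % f)))
        (by omega) (by omega) (by simpa using hlen)]
    refine Prod.ext ?_ rfl
    simp only
    apply List.map_congr_left
    intro e he
    simp only [List.mem_range] at he
    have hlen2 : e < (order.set t.toNat (order.getD t.toNat 0 + w * ((t / c) % f))).length := by
      simpa using (by omega : e < order.length)
    rw [List.getD_eq_getElem _ _ hlen2, List.getElem_set]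
    by_cases het : t.toNat = e
    · subst het
      rw [if_pos rfl, if_neg (by omega), if_pos (by omega), add_zero]
      have : ((t.toNat : Int)) = t := by omega
      rw [List.getD_eq_getElem _ _ htlt, this]
    · rw [if_neg het, ← List.getD_eq_getElem _ _ (by omega : e < order.length)]
      by_cases hte : t + 1 ≤ (e : Int)
      · rw [if_pos hte, if_pos (by omega)]
      · rw [if_neg hte, if_neg (by omega)]

lemma outer_loop (n : Int) (hn : 1 ≤ n) (fs : List Int) (hprod : fs.prod = n)
    (hmem : ∀ x ∈ fs, 2 ≤ x) :
    ∀ (m : Nat) (j : Int) (order : List Int), 0 ≤ j → j + m = fs.length →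
      order.length = n.toNat →
    (PySem.List.pyRange j (fs.length : Int) 1).foldl (pvOuterStep fs n) (order, 0)
      = ((List.range n.toNat).map
           (fun e => order.getD e 0
             + hmSum (fs.drop j.toNat) (fs.take j.toNat).prod (e : Int)), 0) := by
  intro m
  induction m with
  | zero =>
    intro j order hj0 hm hlen
    have hje : j = (fs.length : Int) := by omega
    have hjt : j.toNat = fs.length := by omega
    rw [PySem.List.pyRange_one_eq_nil (by omega), List.foldl_nil, hjt]
    have hmap : (List.range n.toNat).map
        (fun e => order.getD e 0 + hmSum (fs.drop fs.length) (fs.take fs.length).prod (e : Int))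
        = (List.range n.toNat).map (fun e => order.getD e 0) := by
      apply List.map_congr_left
      intro e _
      simp [hmSum]
    rw [hmap, map_getD_self order _ hlen]
  | succ m ih =>
    intro j order hj0 hm hlen
    have hjlt : j.toNat < fs.length := by omega
    rw [PySem.List.pyRange_one_cons (by omega), List.foldl_cons]
    set c := (fs.take j.toNat).prod with hcdef
    set f := fs[j.toNat] with hfdef
    set w := (fs.drop (j.toNat + 1)).prod with hwdef
    have hf2 : 2 ≤ f := hmem _ (List.getElem_mem hjlt)
    have hc1 : 1 ≤ c := by
      apply List.one_le_prod
      intro x hx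
      have := hmem x (List.mem_of_mem_take hx)
      omega
    have hfv : PySem.List.pyGetD fs j 0 = f := by
      rw [PySem.List.pyGetD_eq_getElem fs 0 hj0 (by omega)]
    have hwv : pvProd (PySem.List.slice fs (some (j + 1)) none) = w := by
      rw [pvProd_eq, PySem.List.slice_from fs (by omega)]
      have : (j + 1).toNat = j.toNat + 1 := by omega
      rw [this]
    have hchange : (if j = 0 then (1:Int)
        else pvProd (PySem.List.slice fs none (some j))) = c := by
      by_cases hj0' : j = 0
      · subst hj0'; simp [hcdef]
      · rw [if_neg hj0', pvProd_eq, PySem.List.slice_to fs hj0]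
    have hn2 : n = c * (f * w) := by
      conv_lhs => rw [← hprod, ← List.take_append_drop j.toNat fs]
      rw [List.prod_append, List.drop_eq_getElem_cons hjlt, List.prod_cons]
    have hzero : ((0:Int) / c) % f = 0 ∧ (0:Int) % c = 0 := by
      simp
    have hinner := inner_loop fs j c f w hfv hwv hc1 hf2 n.toNat 0 n order
      (by omega) le_rfl hlen
    have hstep : pvOuterStep fs n (order, 0) j
        = ((List.range n.toNat).map
            (fun e => order.getD e 0 + if (0:Int) ≤ (e : Int) then w * (((e : Int) / c) % f) else 0),
           0) := by
      simp only [pvOuterStep, hchange]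
      rw [show ((order, (0:Int), (0:Int)) : List Int × Int × Int)
            = (order, ((0:Int) / c) % f, (0:Int) % c) by
          rw [hzero.1, hzero.2]]
      rw [hinner]
      have : (n / c) % f = 0 := by
        rw [hn2, Int.mul_ediv_cancel_left _ (by omega), Int.mul_emod_right]
      simp [this]
    rw [hstep]
    rw [ih (j + 1) _ (by omega) (by omega) (by simp)]
    refine Prod.ext ?_ rfl
    simp only
    apply List.map_congr_left
    intro e he
    simp only [List.mem_range] at he
    have hj1t : (j + 1).toNat = j.toNat + 1 := by omega
    have hgd : ((List.range n.toNat).map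
        (fun e => order.getD e 0 + if (0:Int) ≤ (e : Int) then w * (((e : Int) / c) % f) else 0)).getD e 0
        = order.getD e 0 + w * (((e : Int) / c) % f) := by
      rw [List.getD_eq_getElem _ _ (by simp [he]), List.getElem_map, List.getElem_range,
        if_pos (by positivity)]
    rw [hgd, hj1t]
    have htake : (fs.take (j.toNat + 1)).prod = c * f := by
      rw [List.take_add_one, List.prod_append, List.getElem?_eq_getElem hjlt, ← hcdef, ← hfdef]
      simp
    have hdrop : hmSum (fs.drop j.toNat) c (e : Int)
        = w * (((e : Int) / c) % f) + hmSum (fs.drop (j.toNat + 1)) (c * f) (e : Int) := by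
      rw [List.drop_eq_getElem_cons hjlt]
      show hmSum (f :: fs.drop (j.toNat + 1)) c (e : Int) = _
      simp only [hmSum]
      ring
    rw [htake, hdrop]
    ring

lemma suffixWeights_snd (fs : List Int) : (pvSuffixWeights fs).2 = fs.prod := by
  induction fs with
  | nil => simp [pvSuffixWeights]
  | cons f rest ih => simp [pvSuffixWeights, ih]

lemma digits_loop (fs : List Int) (hpos : ∀ x ∈ fs, 0 < x) :
    ∀ (p e val : Int), 0 < p → 0 ≤ e →
      pvDigitsLoop fs (pvSuffixWeights fs).1 (e / p) val = val + hmSum fs p e := by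
  induction fs with
  | nil => intro p e val hp he; simp [pvDigitsLoop, hmSum]
  | cons f rest ih =>
    intro p e val hp he
    have hfpos : 0 < f := hpos f (by simp)
    have hw1 : (pvSuffixWeights (f :: rest)).1 = rest.prod :: (pvSuffixWeights rest).1 := by
      simp [pvSuffixWeights, suffixWeights_snd]
    rw [hw1]
    show pvDigitsLoop rest (pvSuffixWeights rest).1
        (PySem.Int.floordiv (e / p) f) (val + PySem.Int.mod (e / p) f * rest.prod)
      = val + hmSum (f :: rest) p e
    rw [PySem.Int.floordiv_eq_ediv_of_pos hfpos, PySem.Int.mod_eq_emod_of_pos hfpos]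
    rw [Int.ediv_ediv_of_nonneg (by omega : (0:Int) ≤ p)]
    rw [ih (fun x hx => hpos x (by simp [hx])) (p * f) e _ (by positivity) he]
    show val + e / p % f * rest.prod + hmSum rest (p * f) e
      = val + (rest.prod * (e / p % f) + hmSum rest (p * f) e)
    ring

theorem herman_main (n : Int) : herman_meyer_order n = herman_meyer_order_alt n := by
  by_cases hn : 1 ≤ n
  · have hprod : (prime_decomposition n).prod = n := by
      have := primeLoop_prod n 2 (by omega) [] hn
      simpa [prime_decomposition] using this
    have hmem : ∀ x ∈ prime_decomposition n, 2 ≤ x := by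
      intro x hx
      rcases primeLoop_mem n 2 (by omega) [] x hx with h | h
      · simp at h
      · exact h
    set fs := prime_decomposition n with hfs
    have houter := outer_loop n hn fs hprod hmem fs.length 0 (List.replicate n.toNat 0)
      le_rfl (by simp) (by simp)
    simp only [herman_meyer_order, herman_meyer_order_alt, ← hfs]
    rw [houter]
    rw [PySem.List.foldl_append_singleton_eq_map, List.nil_append,
      PySem.List.pyRange_one 0 n, List.map_map]
    have hnt : (n - 0).toNat = n.toNat := by omega
    rw [hnt]
    apply List.map_congr_left
    intro e he
    simp only [List.mem_range] at he
    have hdig := digits_loop fs (fun x hx => by have := hmem x hx; omega)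
      1 (e : Int) 0 (by omega) (by omega)
    rw [Int.ediv_one] at hdig
    simp [Function.comp, hdig]
  · have hfs : prime_decomposition n = [] := by
      unfold prime_decomposition
      rw [pvPrimeLoop, dif_neg (by omega), if_neg (by omega)]
    have hnt : n.toNat = 0 := by omega
    simp only [herman_meyer_order, herman_meyer_order_alt, hfs]
    rw [PySem.List.pyRange_one_eq_nil (by omega : n ≤ 0)]
    simp [hnt, PySem.List.pyRange_one_eq_nil]

-- ===== VERDICT (by name: the statement is the Claim_ definition above) =====
theorem herman_meyer_order_spec : Claim_equal_herman_meyer_order := by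
  intro n _
  unfold Spec_herman_meyer_order
  exact herman_main n
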